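-- pv_equiv track=rewrite | github.com/NotTwist/Scene-change-detector | context.py | calculate_matrix
-- ===== SOURCE A (Python) =====
-- def calculate_matrix(true_scd, predicted_scd, scene_len, not_to_use_frames=set()):
--     predicted_scd = set(predicted_scd)
--     tp, fp, tn, fn = 0, 0, 0, 0
--     scene_len = scene_len
--     for scd in predicted_scd:
--         if scd in true_scd:
--             tp += 1
--         elif scd not in not_to_use_frames:
--             fp += 1
--     for scd in true_scd:
--         if scd not in predicted_scd:
--             fn += 1
--     tn = scene_len - len(not_to_use_frames) - tp - fp - fn
--     return tp, fp, tn, fn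
-- ===== SOURCE B (Python) =====
-- def calculate_matrix(true_scd, predicted_scd, scene_len, not_to_use_frames=set()):
--     # Sort-and-merge reformulation: classify the distinct predicted frames with a
--     # two-pointer sweep over the sorted true/excluded frames, and count fn by
--     # merging the sorted true list (duplicates kept) against the predicted frames.
--     P = _dedup(sorted(predicted_scd))
--     T = _dedup(sorted(true_scd))
--     N = _dedup(sorted(not_to_use_frames))
--     tp, fp = _classify(P, T, N)
--     fn = len(true_scd) - _count_in(sorted(true_scd), P)
--     tn = scene_len - len(not_to_use_frames) - tp - fp - fn
--     return tp, fp, tn, fn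
--
--
-- def _dedup(ys):
--     # ys sorted: drop adjacent duplicates
--     out = []
--     for y in ys:
--         if not out or out[-1] != y:
--             out.append(y)
--     return out
--
--
-- def _classify(P, T, N):
--     # P, T, N sorted, distinct: decide tp / excluded / fp for each x in P,
--     # advancing one pointer into T and one into N monotonically.
--     tp = fp = 0
--     i = j = 0
--     for x in P:
--         while i < len(T) and T[i] < x:
--             i += 1
--         if i < len(T) and T[i] == x:
--             tp += 1
--             continue
--         while j < len(N) and N[j] < x:
--             j += 1
--         if not (j < len(N) and N[j] == x):
--             fp += 1
--     return tp, fp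
--
--
-- def _count_in(X, P):
--     # X sorted (duplicates kept), P sorted distinct: how many entries of X occur in P
--     c = 0
--     k = 0
--     for x in X:
--         while k < len(P) and P[k] < x:
--             k += 1
--         if k < len(P) and P[k] == x:
--             c += 1
--     return c
-- ===== Notes on version B (the rewrite author's own statement) =====
-- stated objective: alternative
-- what changed: Replaces A's hash/list membership-test loops by a sort-then-merge algorithm: predicted, true and excluded frames are sorted and deduplicated, tp/fp come from a two-pointer sweep of the predicted list against the sorted true and excluded lists, and fn from merging the sorted true list (duplicates kept) against the predicted one.
import Mathlib
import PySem

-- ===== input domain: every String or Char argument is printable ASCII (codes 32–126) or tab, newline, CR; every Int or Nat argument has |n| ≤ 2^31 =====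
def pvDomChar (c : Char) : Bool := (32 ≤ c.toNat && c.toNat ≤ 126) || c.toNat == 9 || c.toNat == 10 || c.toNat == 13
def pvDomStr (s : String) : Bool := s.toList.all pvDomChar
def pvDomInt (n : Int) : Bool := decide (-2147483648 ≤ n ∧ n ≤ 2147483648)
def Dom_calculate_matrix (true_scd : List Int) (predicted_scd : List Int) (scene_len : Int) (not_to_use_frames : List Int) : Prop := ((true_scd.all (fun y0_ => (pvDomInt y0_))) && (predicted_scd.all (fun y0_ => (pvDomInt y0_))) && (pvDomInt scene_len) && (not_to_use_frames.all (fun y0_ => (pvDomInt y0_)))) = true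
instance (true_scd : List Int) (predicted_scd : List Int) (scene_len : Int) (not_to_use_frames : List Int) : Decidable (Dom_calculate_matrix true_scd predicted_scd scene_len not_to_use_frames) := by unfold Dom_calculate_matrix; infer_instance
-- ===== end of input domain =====

-- B replaces A's membership-test loops with a sort-then-merge algorithm (sorted deduplication
-- plus monotone two-pointer sweeps); same results, alternative algorithm (not claimed faster).
-- A's first loop iterates a Python set, but only counts, so iteration order does not matter.

-- ===== PORT A =====
def calculate_matrix (true_scd : List Int) (predicted_scd : List Int) (scene_len : Int) (not_to_use_frames : List Int) : List Int :=
  let predicted := PySem.Set.ofList predicted_scd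
  -- for scd in predicted_scd: if scd in true_scd: tp += 1 elif scd not in not_to_use_frames: fp += 1
  let tpfp : Int × Int := predicted.foldl (fun acc scd =>
      if scd ∈ true_scd then (acc.1 + 1, acc.2)
      else if scd ∈ not_to_use_frames then acc
      else (acc.1, acc.2 + 1)) (0, 0)
  let tp := tpfp.1
  let fp := tpfp.2
  -- for scd in true_scd: if scd not in predicted_scd: fn += 1
  let fn : Int := true_scd.foldl (fun acc scd => if scd ∈ predicted then acc else acc + 1) 0
  let tn := scene_len - (not_to_use_frames.length : Int) - tp - fp - fn
  [tp, fp, tn, fn]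

-- ===== PORT B =====
-- _dedup: scan that appends y unless it equals the last kept element (out[-1] = getLast?)
def pvDedup (ys : List Int) : List Int :=
  ys.foldl (fun out y => if out.getLast? = some y then out else out ++ [y]) []

-- the Python index pointers i/j/k only move forward; the port represents the pointer by
-- the remaining suffix of the list, advanced by the same "while T[i] < x: i += 1" scan (exact)
def pvAdvance (x : Int) : List Int → List Int
  | [] => []
  | t :: ts => if t < x then pvAdvance x ts else t :: ts

-- _classify: for each x in P, advance the T-pointer, test T[i] == x, else advance the
-- N-pointer and test N[j] == x ("i < len(T) and T[i] == x" = head? check on the suffix)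
def pvClassify : List Int → List Int → List Int → Int × Int → Int × Int
  | [], _, _, acc => acc
  | x :: xs, T, N, (tp, fp) =>
    let T' := pvAdvance x T
    if T'.head? = some x then pvClassify xs T' N (tp + 1, fp)
    else
      let N' := pvAdvance x N
      if N'.head? = some x then pvClassify xs T' N' (tp, fp)
      else pvClassify xs T' N' (tp, fp + 1)

-- _count_in: same pointer scheme over P for each x of X
def pvCountIn : List Int → List Int → Int → Int
  | [], _, c => c
  | x :: xs, P, c =>
    let P' := pvAdvance x P
    if P'.head? = some x then pvCountIn xs P' (c + 1) else pvCountIn xs P' c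

def calculate_matrix_alt (true_scd : List Int) (predicted_scd : List Int) (scene_len : Int) (not_to_use_frames : List Int) : List Int :=
  let P := pvDedup (PySem.List.sorted predicted_scd (fun x => x) false)
  let T := pvDedup (PySem.List.sorted true_scd (fun x => x) false)
  let N := pvDedup (PySem.List.sorted not_to_use_frames (fun x => x) false)
  let tpfp := pvClassify P T N (0, 0)
  let tp := tpfp.1
  let fp := tpfp.2
  let fn : Int := (true_scd.length : Int) - pvCountIn (PySem.List.sorted true_scd (fun x => x) false) P 0
  let tn := scene_len - (not_to_use_frames.length : Int) - tp - fp - fn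
  [tp, fp, tn, fn]

-- ===== PRECONDITION & SPEC =====
def Spec_calculate_matrix (true_scd : List Int) (predicted_scd : List Int) (scene_len : Int) (not_to_use_frames : List Int) (out : List Int) : Prop := out = calculate_matrix_alt true_scd predicted_scd scene_len not_to_use_frames
instance (true_scd : List Int) (predicted_scd : List Int) (scene_len : Int) (not_to_use_frames : List Int) (out : List Int) : Decidable (Spec_calculate_matrix true_scd predicted_scd scene_len not_to_use_frames out) := by unfold Spec_calculate_matrix; infer_instance

-- ===== CLAIM (what is proved, stated in full; the proofs are below) =====
def Claim_equal_calculate_matrix : Prop := ∀ (true_scd : List Int) (predicted_scd : List Int) (scene_len : Int) (not_to_use_frames : List Int), Dom_calculate_matrix true_scd predicted_scd scene_len not_to_use_frames → Spec_calculate_matrix true_scd predicted_scd scene_len not_to_use_frames (calculate_matrix true_scd predicted_scd scene_len not_to_use_frames)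

-- ===== LEMMAS AND PROOFS =====

-- A's first loop computes, from any start pair, the two filter-cardinalities.
lemma foldl_tpfp (t nf : List Int) (l : List Int) (a b : Int) :
    l.foldl (fun (acc : Int × Int) scd =>
      if scd ∈ t then (acc.1 + 1, acc.2)
      else if scd ∈ nf then acc
      else (acc.1, acc.2 + 1)) (a, b)
    = (a + ((l.filter (fun x => decide (x ∈ t))).length : Int),
       b + ((l.filter (fun x => !(decide (x ∈ t)) && !(decide (x ∈ nf)))).length : Int)) := by
  induction l generalizing a b with
  | nil => simp
  | cons x xs ih =>
    by_cases hx : x ∈ t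
    · simp [hx, ih]; ring
    · by_cases hn : x ∈ nf
      · simp [hx, hn, ih]
      · simp [hx, hn, ih]; ring

-- A's second loop counts by a fold what a filter-length counts.
lemma foldl_fn (p : List Int) (l : List Int) (a : Int) :
    l.foldl (fun acc scd => if scd ∈ p then acc else acc + 1) a
    = a + ((l.filter (fun x => !(decide (x ∈ p)))).length : Int) := by
  induction l generalizing a with
  | nil => simp
  | cons x xs ih =>
    by_cases hx : x ∈ p
    · simp [hx, ih]
    · simp [hx, ih]; ring

-- recursion-shaped companion of pvDedup's fold
def pvDD (prev : Int) : List Int → List Int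
  | [] => []
  | y :: ys => if y = prev then pvDD prev ys else y :: pvDD y ys

lemma pvDedup_aux (ys : List Int) : ∀ (out : List Int) (prev : Int), out.getLast? = some prev →
    ys.foldl (fun out y => if out.getLast? = some y then out else out ++ [y]) out
      = out ++ pvDD prev ys := by
  induction ys with
  | nil => intro out prev _; simp [pvDD]
  | cons y ys ih =>
    intro out prev h
    by_cases hy : y = prev
    · subst hy
      simp only [List.foldl_cons, h, pvDD]
      exact ih out y h
    · have hne : out.getLast? ≠ some y := by
        rw [h]; exact fun hc => hy (Option.some_inj.mp hc).symm
      simp only [List.foldl_cons, if_neg hne, pvDD, if_neg hy]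
      rw [ih (out ++ [y]) y (by simp)]
      simp

lemma pvDedup_cons (y : Int) (ys : List Int) : pvDedup (y :: ys) = y :: pvDD y ys := by
  unfold pvDedup
  simp only [List.foldl_cons, List.getLast?_nil, reduceCtorEq]
  simpa using pvDedup_aux ys [y] y (by simp)

lemma pvDD_strict : ∀ (ys : List Int) (prev : Int), (prev :: ys).Pairwise (· ≤ ·) →
    (pvDD prev ys).Pairwise (· < ·) ∧ ∀ a ∈ pvDD prev ys, prev < a := by
  intro ys
  induction ys with
  | nil => intro prev _; simp [pvDD]
  | cons y ys ih =>
    intro prev h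
    have hpy : prev ≤ y := (List.pairwise_cons.1 h).1 y (by simp)
    have hpys : ∀ a ∈ ys, prev ≤ a := fun a ha => (List.pairwise_cons.1 h).1 a (by simp [ha])
    have hyys : (y :: ys).Pairwise (· ≤ ·) := (List.pairwise_cons.1 h).2
    by_cases hy : y = prev
    · subst hy
      have hd : pvDD y (y :: ys) = pvDD y ys := by simp [pvDD]
      rw [hd]
      exact ih y (List.pairwise_cons.2 ⟨hpys, (List.pairwise_cons.1 hyys).2⟩)
    · have hlt : prev < y := lt_of_le_of_ne hpy (fun hc => hy hc.symm)
      have := ih y hyys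
      simp only [pvDD, if_neg hy]
      refine ⟨List.pairwise_cons.2 ⟨fun a ha => this.2 a ha, this.1⟩, ?_⟩
      intro a ha
      rcases List.mem_cons.1 ha with rfl | ha'
      · exact hlt
      · exact lt_trans hlt (this.2 a ha')

lemma pvDD_mem : ∀ (ys : List Int) (prev : Int), (prev :: ys).Pairwise (· ≤ ·) →
    ∀ a, (a ∈ pvDD prev ys ↔ a ∈ ys ∧ a ≠ prev) := by
  intro ys
  induction ys with
  | nil => intro prev _ a; simp [pvDD]
  | cons y ys ih =>
    intro prev h a
    have hpy : prev ≤ y := (List.pairwise_cons.1 h).1 y (by simp)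
    have hpys : ∀ b ∈ ys, prev ≤ b := fun b hb => (List.pairwise_cons.1 h).1 b (by simp [hb])
    have hyys : (y :: ys).Pairwise (· ≤ ·) := (List.pairwise_cons.1 h).2
    by_cases hy : y = prev
    · subst hy
      have hd : pvDD y (y :: ys) = pvDD y ys := by simp [pvDD]
      rw [hd]
      rw [ih y (List.pairwise_cons.2 ⟨hpys, (List.pairwise_cons.1 hyys).2⟩) a]
      constructor
      · rintro ⟨ha, hne⟩; exact ⟨by simp [ha], hne⟩
      · rintro ⟨ha, hne⟩
        rcases List.mem_cons.1 ha with rfl | ha'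
        · exact absurd rfl hne
        · exact ⟨ha', hne⟩
    · have hlt : prev < y := lt_of_le_of_ne hpy (fun hc => hy hc.symm)
      simp only [pvDD, if_neg hy, List.mem_cons]
      rw [ih y hyys a]
      constructor
      · rintro (rfl | ⟨ha, _⟩)
        · exact ⟨Or.inl rfl, fun hc => hy hc⟩
        · have hya : y ≤ a := (List.pairwise_cons.1 hyys).1 a ha
          refine ⟨Or.inr ha, fun hc => ?_⟩
          have h2 : prev < a := lt_of_lt_of_le hlt hya
          rw [hc] at h2
          exact lt_irrefl _ h2
      · rintro ⟨rfl | ha, hne⟩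
        · exact Or.inl rfl
        · by_cases hay : a = y
          · exact Or.inl hay
          · exact Or.inr ⟨ha, hay⟩

lemma pvDedup_facts (ys : List Int) (h : ys.Pairwise (· ≤ ·)) :
    (pvDedup ys).Pairwise (· < ·) ∧ ∀ a, (a ∈ pvDedup ys ↔ a ∈ ys) := by
  cases ys with
  | nil => simp [pvDedup]
  | cons y ys =>
    rw [pvDedup_cons]
    have hs := pvDD_strict ys y h
    have hm := pvDD_mem ys y h
    refine ⟨List.pairwise_cons.2 ⟨hs.2, hs.1⟩, ?_⟩
    intro a
    simp only [List.mem_cons, hm a]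
    constructor
    · rintro (rfl | ⟨ha, _⟩) <;> simp [*]
    · rintro (rfl | ha)
      · exact Or.inl rfl
      · by_cases hay : a = y
        · exact Or.inl hay
        · exact Or.inr ⟨ha, hay⟩

lemma adv_sublist (x : Int) : ∀ l : List Int, (pvAdvance x l).Sublist l := by
  intro l
  induction l with
  | nil => simp [pvAdvance]
  | cons t ts ih =>
    by_cases ht : t < x
    · simp only [pvAdvance, if_pos ht]; exact ih.cons t
    · simp [pvAdvance, if_neg ht]

lemma adv_pairwise {x : Int} {l : List Int} (h : l.Pairwise (· ≤ ·)) :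
    (pvAdvance x l).Pairwise (· ≤ ·) := h.sublist (adv_sublist x l)

lemma adv_mem {x y : Int} (hxy : x ≤ y) : ∀ l : List Int, (y ∈ pvAdvance x l ↔ y ∈ l) := by
  intro l
  induction l with
  | nil => simp [pvAdvance]
  | cons t ts ih =>
    by_cases ht : t < x
    · simp only [pvAdvance, if_pos ht, List.mem_cons, ih]
      constructor
      · exact Or.inr
      · rintro (rfl | hy)
        · exact absurd (lt_of_lt_of_le ht hxy) (lt_irrefl y)
        · exact hy
    · simp [pvAdvance, if_neg ht]

lemma adv_head_not_lt {x h : Int} : ∀ {l : List Int}, (pvAdvance x l).head? = some h → ¬ h < x := by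
  intro l
  induction l with
  | nil => simp [pvAdvance]
  | cons t ts ih =>
    by_cases ht : t < x
    · simp only [pvAdvance, if_pos ht]; exact ih
    · simp only [pvAdvance, if_neg ht, List.head?_cons, Option.some.injEq]
      rintro rfl; exact ht

lemma adv_head_iff_mem {x : Int} {l : List Int} (hs : l.Pairwise (· ≤ ·)) :
    ((pvAdvance x l).head? = some x) ↔ x ∈ l := by
  constructor
  · intro h
    rw [← adv_mem (le_refl x) l]
    cases hl : pvAdvance x l with
    | nil => rw [hl] at h; simp at h
    | cons a rest =>
      rw [hl] at h
      simp only [List.head?_cons, Option.some.injEq] at h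
      simp [h]
  · intro h
    have hm : x ∈ pvAdvance x l := (adv_mem (le_refl x) l).2 h
    have hp : (pvAdvance x l).Pairwise (· ≤ ·) := adv_pairwise hs
    cases hl : pvAdvance x l with
    | nil => rw [hl] at hm; simp at hm
    | cons a rest =>
      rw [hl] at hm hp
      have hax : ¬ a < x := adv_head_not_lt (by rw [hl]; rfl)
      rcases List.mem_cons.1 hm with rfl | hr
      · rfl
      · have : a ≤ x := (List.pairwise_cons.1 hp).1 x hr
        have : a = x := le_antisymm this (not_lt.1 hax)
        simp [this]

-- the two-pointer sweep computes the same two filter-cardinalities as A's classify loop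
lemma classify_eq : ∀ (P T N : List Int) (tp fp : Int),
    P.Pairwise (· ≤ ·) → T.Pairwise (· ≤ ·) → N.Pairwise (· ≤ ·) →
    pvClassify P T N (tp, fp) =
      (tp + ((P.filter (fun x => decide (x ∈ T))).length : Int),
       fp + ((P.filter (fun x => !(decide (x ∈ T)) && !(decide (x ∈ N)))).length : Int)) := by
  intro P
  induction P with
  | nil => intro T N tp fp _ _ _; simp [pvClassify]
  | cons x xs ih =>
    intro T N tp fp hP hT hN
    have hxle : ∀ y ∈ xs, x ≤ y := (List.pairwise_cons.1 hP).1
    have hxs : xs.Pairwise (· ≤ ·) := (List.pairwise_cons.1 hP).2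
    have hT' : (pvAdvance x T).Pairwise (· ≤ ·) := adv_pairwise hT
    have hN' : (pvAdvance x N).Pairwise (· ≤ ·) := adv_pairwise hN
    have hcongT : xs.filter (fun y => decide (y ∈ pvAdvance x T)) = xs.filter (fun y => decide (y ∈ T)) :=
      List.filter_congr (fun y hy => by simp [adv_mem (hxle y hy) T])
    have hcongTN : xs.filter (fun y => !(decide (y ∈ pvAdvance x T)) && !(decide (y ∈ pvAdvance x N)))
        = xs.filter (fun y => !(decide (y ∈ T)) && !(decide (y ∈ N))) :=
      List.filter_congr (fun y hy => by simp [adv_mem (hxle y hy) T, adv_mem (hxle y hy) N])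
    have hcongTN1 : xs.filter (fun y => !(decide (y ∈ pvAdvance x T)) && !(decide (y ∈ N)))
        = xs.filter (fun y => !(decide (y ∈ T)) && !(decide (y ∈ N))) :=
      List.filter_congr (fun y hy => by simp [adv_mem (hxle y hy) T])
    by_cases hh : (pvAdvance x T).head? = some x
    · have hxT : x ∈ T := (adv_head_iff_mem hT).1 hh
      simp only [pvClassify, if_pos hh]
      rw [ih (pvAdvance x T) N (tp + 1) fp hxs hT' hN, hcongT, hcongTN1]
      simp [hxT]
      ring
    · have hxT : x ∉ T := fun hc => hh ((adv_head_iff_mem hT).2 hc)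
      by_cases hh2 : (pvAdvance x N).head? = some x
      · have hxN : x ∈ N := (adv_head_iff_mem hN).1 hh2
        simp only [pvClassify, if_neg hh, if_pos hh2]
        rw [ih (pvAdvance x T) (pvAdvance x N) tp fp hxs hT' hN', hcongT, hcongTN]
        simp [hxT, hxN]
      · have hxN : x ∉ N := fun hc => hh2 ((adv_head_iff_mem hN).2 hc)
        simp only [pvClassify, if_neg hh, if_neg hh2]
        rw [ih (pvAdvance x T) (pvAdvance x N) tp (fp + 1) hxs hT' hN', hcongT, hcongTN]
        simp [hxT, hxN]
        ring

lemma countIn_eq : ∀ (X P : List Int) (c : Int),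
    X.Pairwise (· ≤ ·) → P.Pairwise (· ≤ ·) →
    pvCountIn X P c = c + ((X.filter (fun x => decide (x ∈ P))).length : Int) := by
  intro X
  induction X with
  | nil => intro P c _ _; simp [pvCountIn]
  | cons x xs ih =>
    intro P c hX hP
    have hxle : ∀ y ∈ xs, x ≤ y := (List.pairwise_cons.1 hX).1
    have hxs : xs.Pairwise (· ≤ ·) := (List.pairwise_cons.1 hX).2
    have hP' : (pvAdvance x P).Pairwise (· ≤ ·) := adv_pairwise hP
    have hcong : xs.filter (fun y => decide (y ∈ pvAdvance x P)) = xs.filter (fun y => decide (y ∈ P)) :=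
      List.filter_congr (fun y hy => by simp [adv_mem (hxle y hy) P])
    by_cases hh : (pvAdvance x P).head? = some x
    · have hxP : x ∈ P := (adv_head_iff_mem hP).1 hh
      simp only [pvCountIn, if_pos hh]
      rw [ih (pvAdvance x P) (c + 1) hxs hP', hcong]
      simp [hxP]
      ring
    · have hxP : x ∉ P := fun hc => hh ((adv_head_iff_mem hP).2 hc)
      simp only [pvCountIn, if_neg hh]
      rw [ih (pvAdvance x P) c hxs hP', hcong]
      simp [hxP]

lemma length_filter_split (p : List Int) (q : Int → Bool) :
    ((p.filter q).length : Int) + ((p.filter (fun x => !(q x))).length : Int) = (p.length : Int) := by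
  induction p with
  | nil => simp
  | cons x xs ih =>
    by_cases hx : q x = true <;> simp [hx] <;> omega

-- ===== VERDICT (by name: the statement is the Claim_ definition above) =====
theorem calculate_matrix_spec : Claim_equal_calculate_matrix := by
  intro t p sl nf _
  unfold Spec_calculate_matrix calculate_matrix calculate_matrix_alt
  -- sorted, dedup facts
  have hps : (PySem.List.sorted p (fun x => x) false).Pairwise (· ≤ ·) := by
    simpa using PySem.List.sorted_pairwise p (fun x => x)
  have hts : (PySem.List.sorted t (fun x => x) false).Pairwise (· ≤ ·) := by
    simpa using PySem.List.sorted_pairwise t (fun x => x)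
  have hns : (PySem.List.sorted nf (fun x => x) false).Pairwise (· ≤ ·) := by
    simpa using PySem.List.sorted_pairwise nf (fun x => x)
  have hP := pvDedup_facts _ hps
  have hT := pvDedup_facts _ hts
  have hN := pvDedup_facts _ hns
  have hPle : (pvDedup (PySem.List.sorted p (fun x => x) false)).Pairwise (· ≤ ·) :=
    hP.1.imp (fun h => le_of_lt h)
  have hTle : (pvDedup (PySem.List.sorted t (fun x => x) false)).Pairwise (· ≤ ·) :=
    hT.1.imp (fun h => le_of_lt h)
  have hNle : (pvDedup (PySem.List.sorted nf (fun x => x) false)).Pairwise (· ≤ ·) :=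
    hN.1.imp (fun h => le_of_lt h)
  -- P is a permutation of set(predicted)
  have hPnodup : (pvDedup (PySem.List.sorted p (fun x => x) false)).Nodup :=
    hP.1.imp (fun h => ne_of_lt h)
  have hPmem : ∀ a, a ∈ pvDedup (PySem.List.sorted p (fun x => x) false) ↔ a ∈ PySem.Set.ofList p := by
    intro a
    rw [hP.2 a, PySem.List.mem_sorted, PySem.Set.mem_ofList]
  have hPerm : (pvDedup (PySem.List.sorted p (fun x => x) false)).Perm (PySem.Set.ofList p) :=
    (List.perm_ext_iff_of_nodup hPnodup (PySem.Set.nodup_ofList p)).2 hPmem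
  simp only [foldl_tpfp, foldl_fn, classify_eq _ _ _ 0 0 hPle hTle hNle,
    countIn_eq _ _ 0 hts hPle, zero_add]
  -- tp: filters agree up to the permutation and membership characterisations
  have etp : (pvDedup (PySem.List.sorted p (fun x => x) false)).filter
        (fun x => decide (x ∈ pvDedup (PySem.List.sorted t (fun x => x) false)))
      = (pvDedup (PySem.List.sorted p (fun x => x) false)).filter (fun x => decide (x ∈ t)) :=
    List.filter_congr (fun y _ => by
      simp only [hT.2 y, PySem.List.mem_sorted])
  have htp : ((pvDedup (PySem.List.sorted p (fun x => x) false)).filter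
        (fun x => decide (x ∈ pvDedup (PySem.List.sorted t (fun x => x) false)))).length
      = ((PySem.Set.ofList p).filter (fun x => decide (x ∈ t))).length := by
    rw [etp]; exact (hPerm.filter _).length_eq
  have efp : (pvDedup (PySem.List.sorted p (fun x => x) false)).filter
        (fun x => !(decide (x ∈ pvDedup (PySem.List.sorted t (fun x => x) false)))
          && !(decide (x ∈ pvDedup (PySem.List.sorted nf (fun x => x) false))))
      = (pvDedup (PySem.List.sorted p (fun x => x) false)).filter
          (fun x => !(decide (x ∈ t)) && !(decide (x ∈ nf))) :=
    List.filter_congr (fun y _ => by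
      have b1 : decide (y ∈ pvDedup (PySem.List.sorted t (fun x => x) false)) = decide (y ∈ t) := by
        simp only [hT.2 y, PySem.List.mem_sorted]
      have b2 : decide (y ∈ pvDedup (PySem.List.sorted nf (fun x => x) false)) = decide (y ∈ nf) := by
        simp only [hN.2 y, PySem.List.mem_sorted]
      rw [b1, b2])
  have hfp : ((pvDedup (PySem.List.sorted p (fun x => x) false)).filter
        (fun x => !(decide (x ∈ pvDedup (PySem.List.sorted t (fun x => x) false)))
          && !(decide (x ∈ pvDedup (PySem.List.sorted nf (fun x => x) false))))).length
      = ((PySem.Set.ofList p).filter (fun x => !(decide (x ∈ t)) && !(decide (x ∈ nf)))).length := by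
    rw [efp]; exact (hPerm.filter _).length_eq
  -- fn: the merge count over sorted(true) equals the membership count over true
  have efn : (PySem.List.sorted t (fun x => x) false).filter
        (fun x => decide (x ∈ pvDedup (PySem.List.sorted p (fun x => x) false)))
      = (PySem.List.sorted t (fun x => x) false).filter (fun x => decide (x ∈ PySem.Set.ofList p)) :=
    List.filter_congr (fun y _ => by simp only [hPmem y])
  have hfn : ((PySem.List.sorted t (fun x => x) false).filter
        (fun x => decide (x ∈ pvDedup (PySem.List.sorted p (fun x => x) false)))).length
      = (t.filter (fun x => decide (x ∈ PySem.Set.ofList p))).length := by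
    rw [efn]; exact ((PySem.List.sorted_perm t (fun x => x) false).filter _).length_eq
  have hsplit := length_filter_split t (fun x => decide (x ∈ PySem.Set.ofList p))
  simp only [htp, hfp, hfn]
  have hA4 : ((t.filter (fun x => !(decide (x ∈ PySem.Set.ofList p)))).length : Int)
      = (t.length : Int) - ((t.filter (fun x => decide (x ∈ PySem.Set.ofList p))).length : Int) := by
    omega
  rw [hA4]
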